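-- pv_equiv track=rewrite | github.com/mikebionic/clearparking | api/main/base/tk_num2text.py | thousand
-- ===== SOURCE A (Python) =====
-- units = (
-- 	u'nol',
-- 	(u'bir', u'bir'),
-- 	(u'iki', u'iki'),
-- 	u'üç', u'dört', u'bäş',
-- 	u'alty', u'ýedi', u'sekiz', u'dokuz'
-- )
--
-- teens = (
-- 	u'on', u'on bir',
-- 	u'on iki', u'on üç',
-- 	u'on dört', u'on bäş',
-- 	u'on alty', u'on ýedi',
-- 	u'on sekiz', u'on dokuz'
-- )
--
-- tens = (
-- 	teens,
-- 	u'ýigrimi', u'otuz',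
-- 	u'kyrk', u'elli',
-- 	u'altmyş', u'ýetmiş',
-- 	u'segsen', u'togsan'
-- )
--
-- hundreds = (
-- 	u'ýüz', u'iki ýüz',
-- 	u'üç ýüz', u'dört ýüz',
-- 	u'bäş ýüz', u'alty ýüz',
-- 	u'ýedi ýüz', u'sekiz ýüz',
-- 	u'dokuz ýüz'
-- )
--
-- def thousand(rest, sex):
-- 	prev = 0
-- 	plural = 2
-- 	name = []
-- 	use_teens = rest % 100 >= 10 and rest % 100 <= 19
-- 	if not use_teens:
-- 		data = ((units, 10), (tens, 100), (hundreds, 1000))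
-- 	else:
-- 		data = ((teens, 10), (hundreds, 1000))
-- 	for names, x in data:
-- 		cur = int(((rest - prev) % x) * 10 / x)
-- 		prev = rest % x
-- 		if x == 10 and use_teens:
-- 			plural = 2
-- 			name.append(teens[cur])
-- 		elif cur == 0:
-- 			continue
-- 		elif x == 10:
-- 			name_ = names[cur]
-- 			if isinstance(name_, tuple):
-- 				name_ = name_[0 if sex == 'm' else 1]
-- 			name.append(name_)
-- 			if cur >= 2 and cur <= 4:
-- 				plural = 1
-- 			elif cur == 1:
-- 				plural = 0
-- 			else:
-- 				plural = 2
-- 		else: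
-- 			name.append(names[cur-1])
-- 	return plural, name
-- ===== SOURCE B (Python) =====
-- units = (
-- 	u'nol',
-- 	(u'bir', u'bir'),
-- 	(u'iki', u'iki'),
-- 	u'üç', u'dört', u'bäş',
-- 	u'alty', u'ýedi', u'sekiz', u'dokuz'
-- )
--
-- teens = (
-- 	u'on', u'on bir',
-- 	u'on iki', u'on üç',
-- 	u'on dört', u'on bäş',
-- 	u'on alty', u'on ýedi',
-- 	u'on sekiz', u'on dokuz'
-- )
--
-- tens = (
-- 	teens,
-- 	u'ýigrimi', u'otuz',
-- 	u'kyrk', u'elli',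
-- 	u'altmyş', u'ýetmiş',
-- 	u'segsen', u'togsan'
-- )
--
-- hundreds = (
-- 	u'ýüz', u'iki ýüz',
-- 	u'üç ýüz', u'dört ýüz',
-- 	u'bäş ýüz', u'alty ýüz',
-- 	u'ýedi ýüz', u'sekiz ýüz',
-- 	u'dokuz ýüz'
-- )
--
-- def thousand(rest, sex):
-- 	m = rest % 1000
-- 	u, t, h = m % 10, m // 10 % 10, m // 100
-- 	name = []
-- 	if t == 1:
-- 		plural = 2
-- 		name.append(teens[u])
-- 	else:
-- 		plural = 2
-- 		if u != 0:
-- 			w = units[u]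
-- 			if isinstance(w, tuple):
-- 				w = w[0 if sex == 'm' else 1]
-- 			name.append(w)
-- 			plural = 1 if 2 <= u <= 4 else (0 if u == 1 else 2)
-- 		if t != 0:
-- 			name.append(tens[t - 1])
-- 	if h != 0:
-- 		name.append(hundreds[h - 1])
-- 	return plural, name
-- ===== Notes on version B (the rewrite author's own statement) =====
-- stated objective: simpler
-- what changed: Replaces the peel-loop over ((units,10),(tens,100),(hundreds,1000)) with incremental prev/cur modular arithmetic by directly extracting the three decimal digits of rest % 1000 and building the word list and plural with explicit conditionals.
import Mathlib
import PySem

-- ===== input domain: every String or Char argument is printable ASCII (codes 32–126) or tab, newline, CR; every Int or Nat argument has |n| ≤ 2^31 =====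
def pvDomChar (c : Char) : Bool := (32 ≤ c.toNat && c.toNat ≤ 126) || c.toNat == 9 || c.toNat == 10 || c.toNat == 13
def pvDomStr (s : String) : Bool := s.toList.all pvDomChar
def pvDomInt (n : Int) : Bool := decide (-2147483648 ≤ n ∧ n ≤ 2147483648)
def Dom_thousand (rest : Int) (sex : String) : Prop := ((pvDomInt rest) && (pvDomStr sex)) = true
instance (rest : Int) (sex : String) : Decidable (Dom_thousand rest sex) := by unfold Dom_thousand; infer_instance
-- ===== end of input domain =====

-- B computes the three decimal digits of rest % 1000 directly and builds the result with
-- explicit conditionals instead of A's peel-loop over ((units,10),(tens,100),(hundreds,1000)); objective: simpler.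


-- ===== PORT A =====
-- module-level tables; Python's `units` mixes strings and 2-tuples, modelled as a Sum
def pyUnits : List (String ⊕ (String × String)) :=
  [.inl "nol", .inr ("bir", "bir"), .inr ("iki", "iki"),
   .inl "üç", .inl "dört", .inl "bäş",
   .inl "alty", .inl "ýedi", .inl "sekiz", .inl "dokuz"]

def pyTeens : List String :=
  ["on", "on bir", "on iki", "on üç", "on dört", "on bäş",
   "on alty", "on ýedi", "on sekiz", "on dokuz"]

-- Python's `tens` has the teens TUPLE at index 0; A only reads tens[cur-1] with cur ≥ 2
-- (cur = 1 implies use_teens, the other branch), so slot 0 is never read; "" marks it.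
def pyTens : List String :=
  ["", "ýigrimi", "otuz", "kyrk", "elli", "altmyş", "ýetmiş", "segsen", "togsan"]

def pyHundreds : List String :=
  ["ýüz", "iki ýüz", "üç ýüz", "dört ýüz", "bäş ýüz", "alty ýüz",
   "ýedi ýüz", "sekiz ýüz", "dokuz ýüz"]

-- tuple indexing with an index always in range (A's cur < 10); default never read
def pyIdxS (l : List String) (i : Int) : String := (PySem.List.pyGet? l i).getD ""

-- cur = int(((rest - prev) % x) * 10 / x): the argument is a nonnegative integer < 10000,
-- exactly representable, so int(·) truncation equals floor division.
def curOf (rest prev x : Int) : Int :=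
  PySem.Int.floordiv (PySem.Int.mod (rest - prev) x * 10) x

-- the loop body has 2 or 3 fixed iterations over a heterogeneous tuple; transliterated unrolled,
-- each step computing the same cur/prev and performing the same branch as A's body
def thousand (rest : Int) (sex : String) : Int × List String :=
  let use_teens := 10 ≤ PySem.Int.mod rest 100 ∧ PySem.Int.mod rest 100 ≤ 19
  if use_teens then
    -- iteration (teens, 10): x == 10 and use_teens branch
    let cur := curOf rest 0 10
    let prev := PySem.Int.mod rest 10
    let plural : Int := 2
    let name := [pyIdxS pyTeens cur]
    -- iteration (hundreds, 1000)
    let cur := curOf rest prev 1000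
    if cur = 0 then (plural, name) else (plural, name ++ [pyIdxS pyHundreds (cur - 1)])
  else
    -- iteration (units, 10)
    let cur := curOf rest 0 10
    let prev := PySem.Int.mod rest 10
    let (plural, name) :=
      if cur = 0 then ((2 : Int), ([] : List String))
      else
        let name_ : String :=
          match PySem.List.pyGet? pyUnits cur with
          | some (.inl s) => s
          | some (.inr p) => if sex = "m" then p.1 else p.2
          | none => ""   -- unreachable: 0 ≤ cur < 10
        (if 2 ≤ cur ∧ cur ≤ 4 then 1 else if cur = 1 then 0 else 2, [name_])
    -- iteration (tens, 100)
    let cur := curOf rest prev 100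
    let prev := PySem.Int.mod rest 100
    let name := if cur = 0 then name else name ++ [pyIdxS pyTens (cur - 1)]
    -- iteration (hundreds, 1000)
    let cur := curOf rest prev 1000
    let name := if cur = 0 then name else name ++ [pyIdxS pyHundreds (cur - 1)]
    (plural, name)

-- ===== PORT B =====
def thousand_alt (rest : Int) (sex : String) : Int × List String :=
  let m := PySem.Int.mod rest 1000
  let u := PySem.Int.mod m 10
  let t := PySem.Int.mod (PySem.Int.floordiv m 10) 10
  let h := PySem.Int.floordiv m 100
  if t = 1 then
    ((2 : Int), [pyIdxS pyTeens u] ++ (if h ≠ 0 then [pyIdxS pyHundreds (h - 1)] else []))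
  else
    let (plural, name) :=
      if u ≠ 0 then
        let w : String :=
          match PySem.List.pyGet? pyUnits u with
          | some (.inl s) => s
          | some (.inr p) => if sex = "m" then p.1 else p.2
          | none => ""
        ((if 2 ≤ u ∧ u ≤ 4 then (1 : Int) else if u = 1 then 0 else 2), [w])
      else ((2 : Int), ([] : List String))
    let name := if t ≠ 0 then name ++ [pyIdxS pyTens (t - 1)] else name
    let name := if h ≠ 0 then name ++ [pyIdxS pyHundreds (h - 1)] else name
    (plural, name)

-- ===== PRECONDITION & SPEC =====
def Spec_thousand (rest : Int) (sex : String) (out : Int × List String) : Prop := out = thousand_alt rest sex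
instance (rest : Int) (sex : String) (out : Int × List String) : Decidable (Spec_thousand rest sex out) := by unfold Spec_thousand; infer_instance

-- ===== CLAIM (what is proved, stated in full; the proofs are below) =====
def Claim_equal_thousand : Prop := ∀ (rest : Int) (sex : String), Dom_thousand rest sex → Spec_thousand rest sex (thousand rest sex)

-- ===== LEMMAS AND PROOFS =====

theorem cur1_eq (rest : Int) : curOf rest 0 10 = PySem.Int.mod (PySem.Int.mod rest 1000) 10 := by
  simp only [curOf, PySem.Int.floordiv_eq_ediv_of_pos (by norm_num : (0:Int) < 10),
    PySem.Int.mod_eq_emod_of_pos (by norm_num : (0:Int) < 10),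
    PySem.Int.mod_eq_emod_of_pos (by norm_num : (0:Int) < 1000)]
  omega

theorem cur2_eq (rest : Int) :
    curOf rest (PySem.Int.mod rest 10) 100 =
      PySem.Int.mod (PySem.Int.floordiv (PySem.Int.mod rest 1000) 10) 10 := by
  simp only [curOf, PySem.Int.floordiv_eq_ediv_of_pos (by norm_num : (0:Int) < 100),
    PySem.Int.floordiv_eq_ediv_of_pos (by norm_num : (0:Int) < 10),
    PySem.Int.mod_eq_emod_of_pos (by norm_num : (0:Int) < 10),
    PySem.Int.mod_eq_emod_of_pos (by norm_num : (0:Int) < 100),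
    PySem.Int.mod_eq_emod_of_pos (by norm_num : (0:Int) < 1000)]
  omega

theorem cur3_eq (rest : Int) :
    curOf rest (PySem.Int.mod rest 100) 1000 =
      PySem.Int.floordiv (PySem.Int.mod rest 1000) 100 := by
  simp only [curOf, PySem.Int.floordiv_eq_ediv_of_pos (by norm_num : (0:Int) < 1000),
    PySem.Int.floordiv_eq_ediv_of_pos (by norm_num : (0:Int) < 100),
    PySem.Int.mod_eq_emod_of_pos (by norm_num : (0:Int) < 100),
    PySem.Int.mod_eq_emod_of_pos (by norm_num : (0:Int) < 1000)]
  omega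

theorem cur3t_eq (rest : Int) :
    curOf rest (PySem.Int.mod rest 10) 1000 =
      PySem.Int.floordiv (PySem.Int.mod rest 1000) 100 := by
  simp only [curOf, PySem.Int.floordiv_eq_ediv_of_pos (by norm_num : (0:Int) < 1000),
    PySem.Int.floordiv_eq_ediv_of_pos (by norm_num : (0:Int) < 100),
    PySem.Int.mod_eq_emod_of_pos (by norm_num : (0:Int) < 10),
    PySem.Int.mod_eq_emod_of_pos (by norm_num : (0:Int) < 1000)]
  omega

theorem teens_iff (rest : Int) :
    (10 ≤ PySem.Int.mod rest 100 ∧ PySem.Int.mod rest 100 ≤ 19) ↔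
      PySem.Int.mod (PySem.Int.floordiv (PySem.Int.mod rest 1000) 10) 10 = 1 := by
  simp only [PySem.Int.floordiv_eq_ediv_of_pos (by norm_num : (0:Int) < 10),
    PySem.Int.mod_eq_emod_of_pos (by norm_num : (0:Int) < 10),
    PySem.Int.mod_eq_emod_of_pos (by norm_num : (0:Int) < 100),
    PySem.Int.mod_eq_emod_of_pos (by norm_num : (0:Int) < 1000)]
  omega

theorem ports_agree (rest : Int) (sex : String) : thousand rest sex = thousand_alt rest sex := by
  simp only [thousand, thousand_alt, cur1_eq, cur2_eq, cur3_eq, cur3t_eq, teens_iff rest,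
    ne_eq, ite_not]
  by_cases ht :
      PySem.Int.mod (PySem.Int.floordiv (PySem.Int.mod rest 1000) 10) 10 = 1
  · simp only [if_pos ht]
    split_ifs with hh <;> simp
  · simp only [if_neg ht]

-- ===== VERDICT (by name: the statement is the Claim_ definition above) =====
theorem thousand_spec : Claim_equal_thousand := by
  intro rest sex _
  exact ports_agree rest sex
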